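-- pv_equiv track=rewrite | github.com/Arsen1302/Code-copy-detector | TestData/solutions/problem_1701_5.py | solution_1701_5
-- ===== SOURCE A (Python) =====
-- from typing import List
--
-- def solution_1701_5(nums: List[int], target: List[int]) -> int:
--     nums.sort()
--     target.sort()
--     evenNums,oddNums=[],[]
--     evenTarget,oddTarget=[],[]
--     n=len(nums)
--     for i in range(n):
--         if nums[i]%2==0:
--             evenNums.append(nums[i])
--         else:
--             oddNums.append(nums[i])
--         if target[i]%2==0:
--             evenTarget.append(target[i])
--         else:
--             oddTarget.append(target[i])
--     ans=0
--     for i in range(len(evenNums)):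
--         ans+=abs(evenNums[i]-evenTarget[i])//2
--     for i in range(len(oddNums)):
--         ans+=abs(oddNums[i]-oddTarget[i])//2
--     return ans//2
-- ===== SOURCE B (Python) =====
-- from typing import List
--
-- def solution_1701_5(nums: List[int], target: List[int]) -> int:
--     nums.sort()
--     target.sort()
--     t = target[:len(nums)]
--     # single merged sweep over both sorted lists; per parity, a FIFO queue of
--     # values still waiting for a partner from the other list
--     pend = {(p, s): [] for p in (0, 1) for s in (0, 1)}
--     total = 0
--     i = j = 0
--     while i < len(nums) or j < len(t):
--         if j == len(t) or (i < len(nums) and nums[i] <= t[j]):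
--             v, side = nums[i], 0
--             i += 1
--         else:
--             v, side = t[j], 1
--             j += 1
--         other = pend[(v % 2, 1 - side)]
--         if other:
--             total += abs(v - other.pop(0)) // 2
--         else:
--             pend[(v % 2, side)].append(v)
--     return total // 2
-- ===== Notes on version B (the rewrite author's own statement) =====
-- stated objective: alternative
-- what changed: replaces A's partition-into-four-parity-buckets-then-two-index-pairing-loops with a single merged two-pointer sweep over both sorted lists that matches values online through per-parity FIFO queues of not-yet-paired values, accumulating each pair's halved difference as soon as its partner arrives
import Mathlib
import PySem

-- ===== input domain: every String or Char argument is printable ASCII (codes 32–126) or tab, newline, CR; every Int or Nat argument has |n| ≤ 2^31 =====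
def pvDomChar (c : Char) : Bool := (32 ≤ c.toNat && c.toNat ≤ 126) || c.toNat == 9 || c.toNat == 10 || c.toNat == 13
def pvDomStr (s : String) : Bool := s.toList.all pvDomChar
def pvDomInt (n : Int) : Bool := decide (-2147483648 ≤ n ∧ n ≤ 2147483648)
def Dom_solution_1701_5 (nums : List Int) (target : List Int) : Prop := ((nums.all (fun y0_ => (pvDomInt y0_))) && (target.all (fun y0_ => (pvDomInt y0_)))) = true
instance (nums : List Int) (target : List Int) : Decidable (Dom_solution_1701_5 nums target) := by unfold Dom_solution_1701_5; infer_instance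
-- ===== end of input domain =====

-- B replaces A's parity-bucket partition plus two index-pairing loops with a single merged
-- two-pointer sweep over both sorted lists, matching values online through per-parity FIFO
-- queues of not-yet-paired values (objective: alternative algorithm, same cost). Both A and B
-- sort their list arguments in place (identical side effects); the equivalence proved here is
-- about the return value.

-- ===== PORT A =====
-- pyGetD is used where Python indexes; Pre_ guarantees every index is in range, so it is exact there.
def solution_1701_5 (nums : List Int) (target : List Int) : Int :=
  let s := PySem.List.sorted nums (fun x => x) false          -- nums.sort()
  let t := PySem.List.sorted target (fun x => x) false        -- target.sort()
  let n : Int := PySem.List.len s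
  let st := (PySem.List.pyRange 0 n 1).foldl
    (fun (st : List Int × List Int × List Int × List Int) i =>
      let x := PySem.List.pyGetD s i 0                        -- nums[i]
      let y := PySem.List.pyGetD t i 0                        -- target[i]
      let a := if PySem.Int.mod x 2 == 0 then (st.1 ++ [x], st.2.1, st.2.2.1, st.2.2.2)
               else (st.1, st.2.1 ++ [x], st.2.2.1, st.2.2.2)
      if PySem.Int.mod y 2 == 0 then (a.1, a.2.1, a.2.2.1 ++ [y], a.2.2.2)
      else (a.1, a.2.1, a.2.2.1, a.2.2.2 ++ [y]))
    ([], [], [], [])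
  let evenNums := st.1
  let oddNums := st.2.1
  let evenTarget := st.2.2.1
  let oddTarget := st.2.2.2
  let ans1 := (PySem.List.pyRange 0 (PySem.List.len evenNums) 1).foldl
    (fun acc i => acc + PySem.Int.floordiv |PySem.List.pyGetD evenNums i 0 - PySem.List.pyGetD evenTarget i 0| 2) 0
  let ans2 := (PySem.List.pyRange 0 (PySem.List.len oddNums) 1).foldl
    (fun acc i => acc + PySem.Int.floordiv |PySem.List.pyGetD oddNums i 0 - PySem.List.pyGetD oddTarget i 0| 2) ans1
  PySem.Int.floordiv ans2 2

-- ===== PORT B =====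
-- the while-loop body: process one value v taken from side s (true = nums side);
-- the Python dict pend with its four fixed keys (parity, side) is the four lists e0 e1 o0 o1
def pvBProc (v : Int) (s : Bool) (e0 e1 o0 o1 : List Int) (tot : Int) :
    List Int × List Int × List Int × List Int × Int :=
  if PySem.Int.mod v 2 == 0 then
    if s then
      match e1 with
      | w :: ws => (e0, ws, o0, o1, tot + PySem.Int.floordiv |v - w| 2)
      | [] => (e0 ++ [v], e1, o0, o1, tot)
    else
      match e0 with
      | w :: ws => (ws, e1, o0, o1, tot + PySem.Int.floordiv |v - w| 2)
      | [] => (e0, e1 ++ [v], o0, o1, tot)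
  else
    if s then
      match o1 with
      | w :: ws => (e0, e1, o0, ws, tot + PySem.Int.floordiv |v - w| 2)
      | [] => (e0, e1, o0 ++ [v], o1, tot)
    else
      match o0 with
      | w :: ws => (e0, e1, ws, o1, tot + PySem.Int.floordiv |v - w| 2)
      | [] => (e0, e1, o0, o1 ++ [v], tot)

-- the while loop: two-pointer merge of the two sorted lists (nums side first on ties)
def pvBLoop : List Int → List Int → List Int → List Int → List Int → List Int → Int → Int
  | [], [], _, _, _, _, tot => tot
  | x :: a, [], e0, e1, o0, o1, tot =>
      let st := pvBProc x true e0 e1 o0 o1 tot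
      pvBLoop a [] st.1 st.2.1 st.2.2.1 st.2.2.2.1 st.2.2.2.2
  | [], y :: b, e0, e1, o0, o1, tot =>
      let st := pvBProc y false e0 e1 o0 o1 tot
      pvBLoop [] b st.1 st.2.1 st.2.2.1 st.2.2.2.1 st.2.2.2.2
  | x :: a, y :: b, e0, e1, o0, o1, tot =>
      if x ≤ y then
        let st := pvBProc x true e0 e1 o0 o1 tot
        pvBLoop a (y :: b) st.1 st.2.1 st.2.2.1 st.2.2.2.1 st.2.2.2.2
      else
        let st := pvBProc y false e0 e1 o0 o1 tot
        pvBLoop (x :: a) b st.1 st.2.1 st.2.2.1 st.2.2.2.1 st.2.2.2.2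
  termination_by a b _ _ _ _ _ => a.length + b.length

def solution_1701_5_alt (nums : List Int) (target : List Int) : Int :=
  let s := PySem.List.sorted nums (fun x => x) false          -- nums.sort()
  let t := PySem.List.sorted target (fun x => x) false        -- target.sort()
  let t' := PySem.List.slice t none (some (PySem.List.len s)) -- t = target[:len(nums)]
  PySem.Int.floordiv (pvBLoop s t' [] [] [] [] 0) 2

-- ===== PRECONDITION & SPEC =====
-- Pre_ excludes exactly the inputs on which A raises IndexError: target shorter than nums, or
-- the nums.length smallest elements of target (a shape condition on the input's order statistics,
-- not a re-run of the algorithm) not containing exactly as many even numbers as nums.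
def Pre_solution_1701_5 (nums : List Int) (target : List Int) : Prop :=
  nums.length ≤ target.length ∧
  nums.countP (fun x => PySem.Int.mod x 2 == 0)
    = ((PySem.List.sorted target (fun x => x) false).take nums.length).countP
        (fun x => PySem.Int.mod x 2 == 0)
instance (nums : List Int) (target : List Int) : Decidable (Pre_solution_1701_5 nums target) := by
  unfold Pre_solution_1701_5; infer_instance
def pvWitness_solution_1701_5 : List Int × List Int := ([1, 2], [3, 4])

def Spec_solution_1701_5 (nums : List Int) (target : List Int) (out : Int) : Prop := out = solution_1701_5_alt nums target
instance (nums : List Int) (target : List Int) (out : Int) : Decidable (Spec_solution_1701_5 nums target out) := by unfold Spec_solution_1701_5; infer_instance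

-- ===== CLAIM (what is proved, stated in full; the proofs are below) =====
def Claim_equal_solution_1701_5 : Prop := ∀ (nums : List Int) (target : List Int), Dom_solution_1701_5 nums target → Pre_solution_1701_5 nums target → Spec_solution_1701_5 nums target (solution_1701_5 nums target)

-- ===== LEMMAS AND PROOFS =====

-- parity predicate, used only by the proofs
def pvPe (x : Int) : Bool := PySem.Int.mod x 2 == 0

-- sum of halved absolute differences over the positional pairing of two lists
def pvZ (u v : List Int) : Int :=
  ((u.zip v).map (fun p => PySem.Int.floordiv |p.1 - p.2| 2)).sum

lemma pvMod_eq (z : Int) : PySem.Int.mod z 2 = z % 2 :=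
  PySem.Int.mod_eq_emod_of_pos (a := z) (by omega)

lemma pvLoopSum (xs ys : List Int) (g : Int → Int → Int) : ∀ (k : Nat),
    k ≤ xs.length → k ≤ ys.length → ∀ (a : Int),
    (PySem.List.pyRange 0 (k : Int) 1).foldl
      (fun acc i => acc + g (PySem.List.pyGetD xs i 0) (PySem.List.pyGetD ys i 0)) a
    = a + (((xs.take k).zip (ys.take k)).map (fun p => g p.1 p.2)).sum := by
  intro k
  induction k with
  | zero => intro _ _ a; simp
  | succ k ih =>
    intro hk hk' a
    have hx : k < xs.length := by omega
    have hy : k < ys.length := by omega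
    rw [show ((k + 1 : Nat) : Int) = (k : Int) + 1 from by push_cast; ring,
      PySem.List.pyRange_one_succ_right (by positivity), List.foldl_append,
      ih (by omega) (by omega) a]
    simp only [List.foldl_cons, List.foldl_nil, PySem.List.pyGetD_natCast]
    rw [List.getD_eq_getElem xs 0 hx, List.getD_eq_getElem ys 0 hy,
      List.take_add_one, List.take_add_one,
      List.getElem?_eq_getElem hx, List.getElem?_eq_getElem hy]
    simp only [Option.toList_some]
    rw [List.zip_append (by simp [hx.le, hy.le])]
    simp [add_assoc]

lemma pvLoopA (s t : List Int) : ∀ (k : Nat), k ≤ s.length → k ≤ t.length →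
    (PySem.List.pyRange 0 (k : Int) 1).foldl
      (fun (st : List Int × List Int × List Int × List Int) i =>
        let x := PySem.List.pyGetD s i 0
        let y := PySem.List.pyGetD t i 0
        let a := if PySem.Int.mod x 2 == 0 then (st.1 ++ [x], st.2.1, st.2.2.1, st.2.2.2)
                 else (st.1, st.2.1 ++ [x], st.2.2.1, st.2.2.2)
        if PySem.Int.mod y 2 == 0 then (a.1, a.2.1, a.2.2.1 ++ [y], a.2.2.2)
        else (a.1, a.2.1, a.2.2.1, a.2.2.2 ++ [y]))
      ([], [], [], [])
    = ((s.take k).filter pvPe, (s.take k).filter (fun x => !pvPe x),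
       (t.take k).filter pvPe, (t.take k).filter (fun x => !pvPe x)) := by
  intro k
  induction k with
  | zero => simp
  | succ k ih =>
    intro hk hk'
    have hx : k < s.length := by omega
    have hy : k < t.length := by omega
    rw [show ((k + 1 : Nat) : Int) = (k : Int) + 1 from by push_cast; ring,
      PySem.List.pyRange_one_succ_right (by positivity), List.foldl_append,
      ih (by omega) (by omega)]
    simp only [List.foldl_cons, List.foldl_nil, PySem.List.pyGetD_natCast]
    rw [List.getD_eq_getElem s 0 hx, List.getD_eq_getElem t 0 hy,
      List.take_add_one, List.take_add_one,
      List.getElem?_eq_getElem hx, List.getElem?_eq_getElem hy]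
    simp only [Option.toList_some, List.filter_append]
    by_cases h1 : (2 : Int) ∣ s[k] <;> by_cases h2 : (2 : Int) ∣ t[k] <;>
      simp [pvPe, h1, h2]

lemma pvFilter_lengths (l : List Int) (p : Int → Bool) :
    (l.filter p).length + (l.filter (fun x => !p x)).length = l.length := by
  induction l with
  | nil => rfl
  | cons x l ih => by_cases h : p x = true <;> simp [h] <;> omega

-- equations for the four (parity, side) cases of one sweep step, used only by the proofs
lemma pvBP_te_pop (v : Int) (e0 o0 o1 ws : List Int) (w tot : Int)
    (hv : (PySem.Int.mod v 2 == 0) = true) :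
    pvBProc v true e0 (w :: ws) o0 o1 tot = (e0, ws, o0, o1, tot + PySem.Int.floordiv |v - w| 2) := by
  simp [pvBProc, hv]
  intro h; simp [pvMod_eq] at hv; omega

lemma pvBP_te_push (v : Int) (e0 o0 o1 : List Int) (tot : Int)
    (hv : (PySem.Int.mod v 2 == 0) = true) :
    pvBProc v true e0 [] o0 o1 tot = (e0 ++ [v], [], o0, o1, tot) := by
  simp [pvBProc, hv]
  intro h; simp [pvMod_eq] at hv; omega

lemma pvBP_fe_pop (v : Int) (ws e1 o0 o1 : List Int) (w tot : Int)
    (hv : (PySem.Int.mod v 2 == 0) = true) :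
    pvBProc v false (w :: ws) e1 o0 o1 tot = (ws, e1, o0, o1, tot + PySem.Int.floordiv |v - w| 2) := by
  simp [pvBProc, hv]
  intro h; simp [pvMod_eq] at hv; omega

lemma pvBP_fe_push (v : Int) (e1 o0 o1 : List Int) (tot : Int)
    (hv : (PySem.Int.mod v 2 == 0) = true) :
    pvBProc v false [] e1 o0 o1 tot = ([], e1 ++ [v], o0, o1, tot) := by
  simp [pvBProc, hv]
  intro h; simp [pvMod_eq] at hv; omega

lemma pvBP_to_pop (v : Int) (e0 e1 o0 ws : List Int) (w tot : Int)
    (hv : (PySem.Int.mod v 2 == 0) = false) :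
    pvBProc v true e0 e1 o0 (w :: ws) tot = (e0, e1, o0, ws, tot + PySem.Int.floordiv |v - w| 2) := by
  simp [pvBProc, hv]
  intro h; simp [pvMod_eq] at hv; omega

lemma pvBP_to_push (v : Int) (e0 e1 o0 : List Int) (tot : Int)
    (hv : (PySem.Int.mod v 2 == 0) = false) :
    pvBProc v true e0 e1 o0 [] tot = (e0, e1, o0 ++ [v], [], tot) := by
  simp [pvBProc, hv]
  intro h; simp [pvMod_eq] at hv; omega

lemma pvBP_fo_pop (v : Int) (e0 e1 ws o1 : List Int) (w tot : Int)
    (hv : (PySem.Int.mod v 2 == 0) = false) :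
    pvBProc v false e0 e1 (w :: ws) o1 tot = (e0, e1, ws, o1, tot + PySem.Int.floordiv |v - w| 2) := by
  simp [pvBProc, hv]
  intro h; simp [pvMod_eq] at hv; omega

lemma pvBP_fo_push (v : Int) (e0 e1 o1 : List Int) (tot : Int)
    (hv : (PySem.Int.mod v 2 == 0) = false) :
    pvBProc v false e0 e1 [] o1 tot = (e0, e1, [], o1 ++ [v], tot) := by
  simp [pvBProc, hv]
  intro h; simp [pvMod_eq] at hv; omega

-- one sweep step keeps the invariant: per parity at most one pending side is nonempty
lemma pvProc_inv (v : Int) (s : Bool) (e0 e1 o0 o1 : List Int) (tot : Int)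
    (he : e0 = [] ∨ e1 = []) (ho : o0 = [] ∨ o1 = []) :
    ((pvBProc v s e0 e1 o0 o1 tot).1 = [] ∨ (pvBProc v s e0 e1 o0 o1 tot).2.1 = []) ∧
    ((pvBProc v s e0 e1 o0 o1 tot).2.2.1 = [] ∨ (pvBProc v s e0 e1 o0 o1 tot).2.2.2.1 = []) := by
  by_cases hv : (PySem.Int.mod v 2 == 0) = true
  · cases s
    · cases e0 with
      | nil => rw [pvBP_fe_push v e1 o0 o1 tot hv]; exact ⟨Or.inl rfl, ho⟩
      | cons w ws =>
        rw [pvBP_fe_pop v ws e1 o0 o1 w tot hv]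
        exact ⟨Or.inr (he.resolve_left (by simp)), ho⟩
    · cases e1 with
      | nil => rw [pvBP_te_push v e0 o0 o1 tot hv]; exact ⟨Or.inr rfl, ho⟩
      | cons w ws =>
        rw [pvBP_te_pop v e0 o0 o1 ws w tot hv]
        exact ⟨Or.inl (he.resolve_right (by simp)), ho⟩
  · rw [Bool.not_eq_true] at hv
    cases s
    · cases o0 with
      | nil => rw [pvBP_fo_push v e0 e1 o1 tot hv]; exact ⟨he, Or.inl rfl⟩
      | cons w ws =>
        rw [pvBP_fo_pop v e0 e1 ws o1 w tot hv]
        exact ⟨he, Or.inr (ho.resolve_left (by simp))⟩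
    · cases o1 with
      | nil => rw [pvBP_to_push v e0 e1 o0 tot hv]; exact ⟨he, Or.inr rfl⟩
      | cons w ws =>
        rw [pvBP_to_pop v e0 e1 o0 ws w tot hv]
        exact ⟨he, Or.inl (ho.resolve_right (by simp))⟩

-- one sweep step accounts for v's future contribution to the positional parity pairing
lemma pvProc_sum (v : Int) (s : Bool) (e0 e1 o0 o1 : List Int) (tot : Int)
    (he : e0 = [] ∨ e1 = []) (ho : o0 = [] ∨ o1 = []) (u0 u1 w0 w1 : List Int) :
    (pvBProc v s e0 e1 o0 o1 tot).2.2.2.2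
      + pvZ ((pvBProc v s e0 e1 o0 o1 tot).1 ++ u0) ((pvBProc v s e0 e1 o0 o1 tot).2.1 ++ u1)
      + pvZ ((pvBProc v s e0 e1 o0 o1 tot).2.2.1 ++ w0) ((pvBProc v s e0 e1 o0 o1 tot).2.2.2.1 ++ w1)
    = tot + pvZ (e0 ++ (if s && pvPe v then v :: u0 else u0)) (e1 ++ (if !s && pvPe v then v :: u1 else u1))
          + pvZ (o0 ++ (if s && !pvPe v then v :: w0 else w0)) (o1 ++ (if !s && !pvPe v then v :: w1 else w1)) := by
  by_cases hv : (PySem.Int.mod v 2 == 0) = true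
  · simp only [pvPe, hv, Bool.and_true, Bool.not_true, Bool.and_false, if_false,
      Bool.true_and, Bool.false_and]
    cases s
    · simp only [Bool.not_false, if_true, if_false, Bool.false_eq_true]
      cases e0 with
      | nil =>
        rw [pvBP_fe_push v e1 o0 o1 tot hv]
        simp [pvZ]
      | cons w ws =>
        obtain rfl := he.resolve_left (by simp)
        rw [pvBP_fe_pop v ws [] o0 o1 w tot hv]
        simp only [pvZ, List.nil_append, List.cons_append, List.zip_cons_cons,
          List.map_cons, List.sum_cons, abs_sub_comm w v]
        ring
    · simp only [Bool.not_true, if_true, if_false, Bool.false_eq_true]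
      cases e1 with
      | nil =>
        rw [pvBP_te_push v e0 o0 o1 tot hv]
        simp [pvZ]
      | cons w ws =>
        obtain rfl := he.resolve_right (by simp)
        rw [pvBP_te_pop v [] o0 o1 ws w tot hv]
        simp only [pvZ, List.nil_append, List.cons_append, List.zip_cons_cons,
          List.map_cons, List.sum_cons]
        ring
  · rw [Bool.not_eq_true] at hv
    simp only [pvPe, hv, Bool.and_false, Bool.not_false, Bool.and_true, if_false,
      Bool.true_and, Bool.false_and, Bool.false_eq_true]
    cases s
    · simp only [Bool.not_false, if_true, if_false, Bool.false_eq_true]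
      cases o0 with
      | nil =>
        rw [pvBP_fo_push v e0 e1 o1 tot hv]
        simp [pvZ]
      | cons w ws =>
        obtain rfl := ho.resolve_left (by simp)
        rw [pvBP_fo_pop v e0 e1 ws [] w tot hv]
        simp only [pvZ, List.nil_append, List.cons_append, List.zip_cons_cons,
          List.map_cons, List.sum_cons, abs_sub_comm w v]
        ring
    · simp only [Bool.not_true, if_true, if_false, Bool.false_eq_true]
      cases o1 with
      | nil =>
        rw [pvBP_to_push v e0 e1 o0 tot hv]
        simp [pvZ]
      | cons w ws =>
        obtain rfl := ho.resolve_right (by simp)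
        rw [pvBP_to_pop v e0 e1 [] ws w tot hv]
        simp only [pvZ, List.nil_append, List.cons_append, List.zip_cons_cons,
          List.map_cons, List.sum_cons]
        ring

-- the sweep computes the positional pairing sum of the parity subsequences
lemma pvBLoop_eq_aux : ∀ (n : Nat) (a b e0 e1 o0 o1 : List Int) (tot : Int),
    a.length + b.length ≤ n → (e0 = [] ∨ e1 = []) → (o0 = [] ∨ o1 = []) →
    pvBLoop a b e0 e1 o0 o1 tot
      = tot + pvZ (e0 ++ a.filter pvPe) (e1 ++ b.filter pvPe)
            + pvZ (o0 ++ a.filter (fun x => !pvPe x)) (o1 ++ b.filter (fun x => !pvPe x)) := by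
  intro n
  induction n with
  | zero =>
    intro a b e0 e1 o0 o1 tot hlen he ho
    have ha : a = [] := by cases a <;> simp_all
    have hb : b = [] := by cases b <;> simp_all
    subst ha; subst hb
    rcases he with rfl | rfl <;> rcases ho with rfl | rfl <;> simp [pvBLoop, pvZ]
  | succ n ih =>
    intro a b e0 e1 o0 o1 tot hlen he ho
    cases a with
    | nil =>
      cases b with
      | nil => rcases he with rfl | rfl <;> rcases ho with rfl | rfl <;> simp [pvBLoop, pvZ]
      | cons y b =>
        obtain ⟨he', ho'⟩ := pvProc_inv y false e0 e1 o0 o1 tot he ho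
        rw [show pvBLoop [] (y :: b) e0 e1 o0 o1 tot
            = pvBLoop [] b (pvBProc y false e0 e1 o0 o1 tot).1 (pvBProc y false e0 e1 o0 o1 tot).2.1
                (pvBProc y false e0 e1 o0 o1 tot).2.2.1 (pvBProc y false e0 e1 o0 o1 tot).2.2.2.1
                (pvBProc y false e0 e1 o0 o1 tot).2.2.2.2 from by rw [pvBLoop]]
        rw [ih [] b _ _ _ _ _ (by simp at hlen ⊢; omega) he' ho',
          pvProc_sum y false e0 e1 o0 o1 tot he ho ([].filter pvPe) (b.filter pvPe)
            ([].filter (fun z => !pvPe z)) (b.filter (fun z => !pvPe z))]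
        by_cases hy : pvPe y = true <;> simp [List.filter_cons, hy]
    | cons x a =>
      cases b with
      | nil =>
        obtain ⟨he', ho'⟩ := pvProc_inv x true e0 e1 o0 o1 tot he ho
        rw [show pvBLoop (x :: a) [] e0 e1 o0 o1 tot
            = pvBLoop a [] (pvBProc x true e0 e1 o0 o1 tot).1 (pvBProc x true e0 e1 o0 o1 tot).2.1
                (pvBProc x true e0 e1 o0 o1 tot).2.2.1 (pvBProc x true e0 e1 o0 o1 tot).2.2.2.1
                (pvBProc x true e0 e1 o0 o1 tot).2.2.2.2 from by rw [pvBLoop]]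
        rw [ih a [] _ _ _ _ _ (by simp at hlen ⊢; omega) he' ho',
          pvProc_sum x true e0 e1 o0 o1 tot he ho (a.filter pvPe) ([].filter pvPe)
            (a.filter (fun z => !pvPe z)) ([].filter (fun z => !pvPe z))]
        by_cases hx : pvPe x = true <;> simp [List.filter_cons, hx]
      | cons y b =>
        by_cases hxy : x ≤ y
        · obtain ⟨he', ho'⟩ := pvProc_inv x true e0 e1 o0 o1 tot he ho
          rw [show pvBLoop (x :: a) (y :: b) e0 e1 o0 o1 tot
              = pvBLoop a (y :: b) (pvBProc x true e0 e1 o0 o1 tot).1 (pvBProc x true e0 e1 o0 o1 tot).2.1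
                  (pvBProc x true e0 e1 o0 o1 tot).2.2.1 (pvBProc x true e0 e1 o0 o1 tot).2.2.2.1
                  (pvBProc x true e0 e1 o0 o1 tot).2.2.2.2 from by rw [pvBLoop]; rw [if_pos hxy]]
          rw [ih a (y :: b) _ _ _ _ _ (by simp at hlen ⊢; omega) he' ho',
            pvProc_sum x true e0 e1 o0 o1 tot he ho (a.filter pvPe) ((y :: b).filter pvPe)
              (a.filter (fun z => !pvPe z)) ((y :: b).filter (fun z => !pvPe z))]
          by_cases hx : pvPe x = true <;> simp [List.filter_cons, hx]
        · obtain ⟨he', ho'⟩ := pvProc_inv y false e0 e1 o0 o1 tot he ho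
          rw [show pvBLoop (x :: a) (y :: b) e0 e1 o0 o1 tot
              = pvBLoop (x :: a) b (pvBProc y false e0 e1 o0 o1 tot).1 (pvBProc y false e0 e1 o0 o1 tot).2.1
                  (pvBProc y false e0 e1 o0 o1 tot).2.2.1 (pvBProc y false e0 e1 o0 o1 tot).2.2.2.1
                  (pvBProc y false e0 e1 o0 o1 tot).2.2.2.2 from by rw [pvBLoop]; rw [if_neg hxy]]
          rw [ih (x :: a) b _ _ _ _ _ (by simp at hlen ⊢; omega) he' ho',
            pvProc_sum y false e0 e1 o0 o1 tot he ho ((x :: a).filter pvPe) (b.filter pvPe)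
              ((x :: a).filter (fun z => !pvPe z)) (b.filter (fun z => !pvPe z))]
          by_cases hy : pvPe y = true <;> simp [List.filter_cons, hy]

lemma pvBLoop_eq (a b e0 e1 o0 o1 : List Int) (tot : Int)
    (he : e0 = [] ∨ e1 = []) (ho : o0 = [] ∨ o1 = []) :
    pvBLoop a b e0 e1 o0 o1 tot
      = tot + pvZ (e0 ++ a.filter pvPe) (e1 ++ b.filter pvPe)
            + pvZ (o0 ++ a.filter (fun x => !pvPe x)) (o1 ++ b.filter (fun x => !pvPe x)) :=
  pvBLoop_eq_aux (a.length + b.length) a b e0 e1 o0 o1 tot le_rfl he ho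

-- ===== VERDICT (by name: the statement is the Claim_ definition above) =====
theorem solution_1701_5_spec : Claim_equal_solution_1701_5 := by
  intro nums target _ hpre
  obtain ⟨hlen, hcnt⟩ := hpre
  unfold Spec_solution_1701_5 solution_1701_5 solution_1701_5_alt
  simp only [PySem.List.len_eq]
  set s := PySem.List.sorted nums (fun x => x) false with hs
  set t := PySem.List.sorted target (fun x => x) false with ht
  have hls : s.length = nums.length := PySem.List.length_sorted nums (fun x => x) false
  have hlt : t.length = target.length := PySem.List.length_sorted target (fun x => x) false
  rw [PySem.List.slice_to_natCast]
  set t' := t.take s.length with ht'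
  have hlt' : t'.length = s.length := by
    rw [ht', List.length_take]; omega
  have hcs : s.countP pvPe = t'.countP pvPe := by
    have h1 := (PySem.List.sorted_perm nums (fun x => x) false).countP_eq pvPe
    rw [← hs] at h1
    rw [h1, ht', hls]
    exact hcnt
  have hfE : (s.filter pvPe).length = (t'.filter pvPe).length := by
    rw [List.countP_eq_length_filter] at hcs; rw [List.countP_eq_length_filter] at hcs
    exact hcs
  have hfO : (s.filter (fun x => !pvPe x)).length = (t'.filter (fun x => !pvPe x)).length := by
    have h1 := pvFilter_lengths s pvPe
    have h2 := pvFilter_lengths t' pvPe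
    omega
  rw [pvLoopA s t s.length le_rfl (by omega), List.take_length, ← ht']
  rw [pvLoopSum (s.filter pvPe) (t'.filter pvPe) (fun a b => PySem.Int.floordiv |a - b| 2)
      (s.filter pvPe).length le_rfl (le_of_eq hfE)]
  rw [pvLoopSum (s.filter (fun x => !pvPe x)) (t'.filter (fun x => !pvPe x))
      (fun a b => PySem.Int.floordiv |a - b| 2)
      (s.filter (fun x => !pvPe x)).length le_rfl (le_of_eq hfO)]
  rw [List.take_length, List.take_of_length_le (le_of_eq hfE.symm),
    List.take_length, List.take_of_length_le (le_of_eq hfO.symm)]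
  rw [pvBLoop_eq s t' [] [] [] [] 0 (Or.inl rfl) (Or.inl rfl)]
  simp only [pvZ, List.nil_append]
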